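-- pv_equiv track=rewrite | github.com/cat2151/cat-github-watcher | src/gh_pr_phase_monitor/monitor/local_repo_watcher.py | _is_target_repo
-- ===== SOURCE A (Python) =====
-- def _is_target_repo(remote_url: str, github_username: str) -> bool:
--     """Return True if the remote URL belongs to the given GitHub user.
--
--     Supports both HTTPS (https://github.com/<user>/...)
--     and SSH (git@github.com:<user>/...) URL formats.
--     Uses strict host matching to avoid false positives from URLs like
--     'github.com.evil.com' or 'notgithub.com'.
--     """
--     user_low = github_username.lower()
--     stripped = remote_url.strip().lower()
--
--     # SSH format: git@github.com:<user>/...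
--     if stripped.startswith("git@github.com:"):
--         rest = stripped[len("git@github.com:") :]
--         return rest.startswith(f"{user_low}/")
--
--     # HTTPS format: https://github.com/<user>/...
--     for prefix in ("https://github.com/", "http://github.com/"):
--         if stripped.startswith(prefix):
--             rest = stripped[len(prefix) :]
--             return rest.startswith(f"{user_low}/")
--
--     return False
-- ===== SOURCE B (Python) =====
-- def _is_target_repo(remote_url: str, github_username: str) -> bool:
--     """Return True if the remote URL belongs to the given GitHub user."""
--     s = remote_url.strip().lower()
--     if s.startswith("git@"):
--         host, sep, path = s[4:].partition(":")
--     elif s.startswith("https://") or s.startswith("http://"):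
--         host, sep, path = s.partition("://")[2].partition("/")
--     else:
--         return False
--     return host == "github.com" and sep != "" and path.startswith(github_username.lower() + "/")
-- ===== Notes on version B (the rewrite author's own statement) =====
-- stated objective: alternative
-- what changed: Replaces A's prefix-list scan (match one of three full scheme+host prefixes, slice it off, re-test the remainder) with a URL parse: strip the scheme marker with partition, extract the host and path components, and compare the host against 'github.com' by equality before testing the owner segment.
import Mathlib
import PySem

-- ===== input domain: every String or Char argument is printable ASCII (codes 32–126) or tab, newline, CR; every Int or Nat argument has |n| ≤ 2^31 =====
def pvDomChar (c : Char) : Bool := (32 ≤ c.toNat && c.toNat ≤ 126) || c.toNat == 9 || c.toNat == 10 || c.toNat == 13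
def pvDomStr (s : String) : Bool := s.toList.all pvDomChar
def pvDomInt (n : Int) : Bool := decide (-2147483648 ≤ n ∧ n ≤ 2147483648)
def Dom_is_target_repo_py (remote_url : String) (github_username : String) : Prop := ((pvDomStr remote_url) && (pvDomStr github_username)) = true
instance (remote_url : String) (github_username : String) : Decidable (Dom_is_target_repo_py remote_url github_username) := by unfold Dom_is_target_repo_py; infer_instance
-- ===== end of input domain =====

-- B replaces A's prefix-list scan (match a full scheme+host prefix, slice, re-test) with a URL parse:
-- strip the scheme marker via partition, extract host and path, compare the host by equality. Same cost.


-- ===== PORT A =====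
-- A's 'for prefix in (...)' loop with its early return, as structural recursion over the prefix list
def is_target_repo_go (stripped : List Char) (needle : List Char) : List (List Char) → Bool
  | [] => false
  | p :: ps =>
    if PySem.Chars.startswith stripped p then
      PySem.Chars.startswith (PySem.List.slice stripped (some (p.length : Int)) none) needle
    else is_target_repo_go stripped needle ps

def is_target_repo_py (remote_url : String) (github_username : String) : Bool :=
  let user_low := PySem.Chars.lower github_username.toList
  let stripped := PySem.Chars.lower (PySem.Chars.strip remote_url.toList)
  -- SSH format: git@github.com:<user>/...
  if PySem.Chars.startswith stripped "git@github.com:".toList then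
    PySem.Chars.startswith
      (PySem.List.slice stripped (some (("git@github.com:".toList).length : Int)) none)
      (user_low ++ ['/'])
  else
    -- HTTPS format: https://github.com/<user>/...
    is_target_repo_go stripped (user_low ++ ['/'])
      ["https://github.com/".toList, "http://github.com/".toList]

-- ===== PORT B =====
-- hand port of Python's str.partition (exact for sep ≠ ""; B never calls it with an empty sep)
def pyPartition (s sep : List Char) : List Char × List Char × List Char :=
  let i := PySem.Chars.find s sep
  if i = -1 then (s, [], [])
  else (s.take i.toNat, sep, s.drop (i.toNat + sep.length))

-- B's shared final line: host == 'github.com' and sep != '' and path.startswith(user.lower() + '/')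
def is_target_repo_check (hsp : List Char × List Char × List Char) (github_username : String) : Bool :=
  hsp.1 == "github.com".toList && !hsp.2.1.isEmpty &&
    PySem.Chars.startswith hsp.2.2 (PySem.Chars.lower github_username.toList ++ ['/'])

def is_target_repo_py_alt (remote_url : String) (github_username : String) : Bool :=
  let s := PySem.Chars.lower (PySem.Chars.strip remote_url.toList)
  if PySem.Chars.startswith s "git@".toList then
    -- host, sep, path = s[4:].partition(":")
    is_target_repo_check (pyPartition (PySem.List.slice s (some ((4:Nat) : Int)) none) ":".toList) github_username
  else if PySem.Chars.startswith s "https://".toList || PySem.Chars.startswith s "http://".toList then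
    -- host, sep, path = s.partition("://")[2].partition("/")
    is_target_repo_check (pyPartition (pyPartition s "://".toList).2.2 "/".toList) github_username
  else false

-- ===== PRECONDITION & SPEC =====
def Spec_is_target_repo_py (remote_url : String) (github_username : String) (out : Bool) : Prop := out = is_target_repo_py_alt remote_url github_username
instance (remote_url : String) (github_username : String) (out : Bool) : Decidable (Spec_is_target_repo_py remote_url github_username out) := by unfold Spec_is_target_repo_py; infer_instance

-- ===== CLAIM (what is proved, stated in full; the proofs are below) =====
def Claim_equal_is_target_repo_py : Prop := ∀ (remote_url : String) (github_username : String), Dom_is_target_repo_py remote_url github_username → Spec_is_target_repo_py remote_url github_username (is_target_repo_py remote_url github_username)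

-- ===== LEMMAS AND PROOFS =====

-- splitting a prefix: p ++ t is a prefix of s iff p is and t is a prefix of the remainder
theorem pfx_append (p t s : List Char) : p ++ t <+: s ↔ p <+: s ∧ t <+: s.drop p.length := by
  constructor
  · rintro ⟨u, rfl⟩
    exact ⟨⟨t ++ u, by simp⟩, ⟨u, by simp⟩⟩
  · rintro ⟨⟨u, rfl⟩, ⟨v, hv⟩⟩
    refine ⟨v, ?_⟩
    rw [List.drop_append] at hv
    simp at hv
    simp [hv]

-- s.startswith(p + t) is the prefix test for p plus the test for t on the rest after p
theorem sw_append (s p t : List Char) :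
    PySem.Chars.startswith s (p ++ t) =
      (PySem.Chars.startswith s p && PySem.Chars.startswith (s.drop p.length) t) := by
  rw [Bool.eq_iff_iff, Bool.and_eq_true, PySem.Chars.startswith_iff,
    PySem.Chars.startswith_iff, PySem.Chars.startswith_iff]
  exact pfx_append p t s

-- if s starts with p and neither of p, q is a prefix of the other, s does not start with q
theorem sw_excl (s p q : List Char) (hpq : (p.isPrefixOf q || q.isPrefixOf p) = false)
    (hp : PySem.Chars.startswith s p = true) : PySem.Chars.startswith s q = false := by
  by_contra hq
  rw [Bool.not_eq_false, PySem.Chars.startswith_iff] at hq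
  rw [PySem.Chars.startswith_iff] at hp
  rcases List.prefix_or_prefix_of_prefix hp hq with h | h <;>
    rw [← List.isPrefixOf_iff_prefix] at h <;> simp [h] at hpq

theorem sw_mono (s p q : List Char) (h : PySem.Chars.startswith s p = false) :
    PySem.Chars.startswith s (p ++ q) = false := by
  rw [sw_append, h, Bool.false_and]

-- a prefix shorter than p is a prefix of p ++ r iff it is a prefix of p
theorem pfx_append_of_le (sub p r : List Char) (hl : sub.length ≤ p.length) :
    sub <+: p ++ r ↔ sub <+: p := by
  rw [List.prefix_iff_eq_take, List.prefix_iff_eq_take, List.take_append_of_le_length hl]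

-- the first occurrence of sep in h ++ sep ++ r is at h.length, provided none lies inside h
theorem find_at (h sep r : List Char)
    (hmin : ∀ i < h.length, ¬ sep <+: (h ++ sep).drop i) :
    PySem.Chars.find (h ++ (sep ++ r)) sep = (h.length : Int) := by
  have hpre : sep <+: (h ++ (sep ++ r)).drop h.length := by
    rw [List.drop_left]; exact ⟨r, rfl⟩
  have hinf : PySem.Chars.isIn sep (h ++ (sep ++ r)) = true := by
    rw [← PySem.Chars.exists_prefix_drop_iff_isIn]; exact ⟨h.length, hpre⟩
  have hnn : 0 ≤ PySem.Chars.find (h ++ (sep ++ r)) sep := by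
    rw [PySem.Chars.find_nonneg_iff, ← PySem.Chars.isIn_iff_infix]; exact hinf
  obtain ⟨hp, hm⟩ := PySem.Chars.find_spec hnn
  set f := PySem.Chars.find (h ++ (sep ++ r)) sep with hf
  have hle : f.toNat ≤ h.length := by
    by_contra hgt
    exact absurd hpre (hm h.length (by omega))
  have hge : h.length ≤ f.toNat := by
    by_contra hlt
    push Not at hlt
    have heq : (h ++ (sep ++ r)).drop f.toNat = (h ++ sep).drop f.toNat ++ r := by
      rw [← List.append_assoc, List.drop_append_of_le_length (by simp; omega)]
    rw [heq] at hp
    have hlen : sep.length ≤ ((h ++ sep).drop f.toNat).length := by simp; omega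
    rw [pfx_append_of_le _ _ _ hlen] at hp
    exact hmin f.toNat hlt hp
  omega

-- partition splits h ++ sep ++ r exactly at sep when sep does not occur inside h
theorem partition_at (h sep r : List Char)
    (hmin : ∀ i < h.length, ¬ sep <+: (h ++ sep).drop i) :
    pyPartition (h ++ (sep ++ r)) sep = (h, sep, r) := by
  unfold pyPartition
  rw [find_at h sep r hmin]
  have hne : (h.length : Int) ≠ -1 := by omega
  simp only [hne, if_false]
  have h1 : ((h.length : Int)).toNat = h.length := by omega
  rw [h1, List.take_left]
  have : (h ++ (sep ++ r)).drop (h.length + sep.length) = r := by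
    rw [← List.append_assoc, ← List.length_append, List.drop_left]
  rw [this]

-- if t does not start with h ++ sep, the partition of t at sep cannot yield head h with sep found
theorem check_false (t h sep : List Char) (hnot : ¬ (h ++ sep) <+: t) :
    ((pyPartition t sep).1 == h && !(pyPartition t sep).2.1.isEmpty) = false := by
  unfold pyPartition
  by_cases hf : PySem.Chars.find t sep = -1
  · simp [hf]
  · have hnn : 0 ≤ PySem.Chars.find t sep := by
      have := PySem.Chars.neg_one_le_find t sep
      omega
    obtain ⟨hp, _⟩ := PySem.Chars.find_spec hnn
    simp only [hf, if_false]
    by_cases hh : t.take (PySem.Chars.find t sep).toNat = h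
    · exfalso
      apply hnot
      obtain ⟨u, hu⟩ := hp
      refine ⟨u, Eq.symm ?_⟩
      calc t = t.take (PySem.Chars.find t sep).toNat ++ t.drop (PySem.Chars.find t sep).toNat := (List.take_append_drop _ t).symm
        _ = h ++ (sep ++ u) := by rw [hh, hu]
        _ = h ++ sep ++ u := by rw [List.append_assoc]
    · simp [hh]

-- B's shared check on a partition at sep equals the two-stage prefix test for 'github.com' + sep
theorem check_eq (t sep : List Char) (u : String) (hsep : sep ≠ [])
    (hmin : ∀ i < ("github.com".toList).length, ¬ sep <+: ("github.com".toList ++ sep).drop i) :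
    is_target_repo_check (pyPartition t sep) u
      = (PySem.Chars.startswith t ("github.com".toList ++ sep) &&
         PySem.Chars.startswith (t.drop ("github.com".toList ++ sep).length)
           (PySem.Chars.lower u.toList ++ ['/'])) := by
  by_cases hc : PySem.Chars.startswith t ("github.com".toList ++ sep) = true
  · obtain ⟨r2, hr⟩ := (PySem.Chars.startswith_iff t _).mp hc
    subst hr
    rw [List.append_assoc, partition_at _ _ _ hmin]
    rw [← List.append_assoc, List.drop_left]
    rw [hc]
    unfold is_target_repo_check
    have : sep.isEmpty = false := by cases sep with
      | nil => exact absurd rfl hsep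
      | cons a l => rfl
    simp [this]
  · rw [Bool.not_eq_true] at hc
    rw [hc, Bool.false_and]
    have hnot : ¬ ("github.com".toList ++ sep) <+: t := by
      rw [← PySem.Chars.startswith_iff, hc]; exact Bool.false_ne_true
    unfold is_target_repo_check
    rw [check_false t "github.com".toList sep hnot, Bool.false_and]

-- the main equality, on the stripped/lowered list form
theorem core_eq (s : List Char) (u : String) :
    (let user_low := PySem.Chars.lower u.toList
     if PySem.Chars.startswith s "git@github.com:".toList then
       PySem.Chars.startswith
         (PySem.List.slice s (some (("git@github.com:".toList).length : Int)) none)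
         (user_low ++ ['/'])
     else
       is_target_repo_go s (user_low ++ ['/'])
         ["https://github.com/".toList, "http://github.com/".toList])
    = (if PySem.Chars.startswith s "git@".toList then
         is_target_repo_check (pyPartition (PySem.List.slice s (some ((4:Nat) : Int)) none) ":".toList) u
       else if PySem.Chars.startswith s "https://".toList || PySem.Chars.startswith s "http://".toList then
         is_target_repo_check (pyPartition (pyPartition s "://".toList).2.2 "/".toList) u
       else false) := by
  dsimp only
  simp only [PySem.List.slice_from_natCast]
  by_cases hg4 : PySem.Chars.startswith s "git@".toList = true
  · rw [if_pos hg4, check_eq _ _ _ (by decide) (by decide)]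
    have hfull : PySem.Chars.startswith s "git@github.com:".toList
        = (PySem.Chars.startswith s "git@".toList &&
           PySem.Chars.startswith (s.drop 4) ("github.com".toList ++ ":".toList)) :=
      sw_append s "git@".toList ("github.com".toList ++ ":".toList)
    by_cases hg : PySem.Chars.startswith (s.drop 4) ("github.com".toList ++ ":".toList) = true
    · rw [if_pos (show PySem.Chars.startswith s "git@github.com:".toList = true by
        rw [hfull, hg4, hg]; rfl), hg, Bool.true_and]
      congr 1
      rw [List.drop_drop]
      congr 1
    · rw [Bool.not_eq_true] at hg
      rw [if_neg (show ¬ PySem.Chars.startswith s "git@github.com:".toList = true by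
        rw [hfull, hg]; simp), hg, Bool.false_and]
      have e1 : PySem.Chars.startswith s "https://github.com/".toList = false :=
        sw_excl s "git@".toList "https://github.com/".toList (by decide) hg4
      have e2 : PySem.Chars.startswith s "http://github.com/".toList = false :=
        sw_excl s "git@".toList "http://github.com/".toList (by decide) hg4
      simp only [is_target_repo_go, PySem.List.slice_from_natCast]
      rw [e1, e2]
      simp
  · rw [Bool.not_eq_true] at hg4
    have hfullf : PySem.Chars.startswith s "git@github.com:".toList = false :=
      sw_mono s "git@".toList "github.com:".toList hg4
    rw [if_neg (show ¬ PySem.Chars.startswith s "git@github.com:".toList = true by rw [hfullf]; simp),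
      if_neg (show ¬ PySem.Chars.startswith s "git@".toList = true by rw [hg4]; simp)]
    simp only [is_target_repo_go, PySem.List.slice_from_natCast]
    by_cases h1 : PySem.Chars.startswith s "https://".toList = true
    · have h2f : PySem.Chars.startswith s "http://".toList = false :=
        sw_excl s "https://".toList "http://".toList (by decide) h1
      rw [if_pos (show (PySem.Chars.startswith s "https://".toList
          || PySem.Chars.startswith s "http://".toList) = true by rw [h1]; simp)]
      obtain ⟨r, hr⟩ := (PySem.Chars.startswith_iff s _).mp h1
      subst hr
      have hpart : pyPartition ("https://".toList ++ r) "://".toList = ("https".toList, "://".toList, r) :=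
        partition_at "https".toList "://".toList r (by decide)
      rw [hpart, check_eq _ _ _ (by decide) (by decide)]
      have hf1 : PySem.Chars.startswith ("https://".toList ++ r) "https://github.com/".toList
          = PySem.Chars.startswith r ("github.com".toList ++ "/".toList) := by
        have h := sw_append ("https://".toList ++ r) "https://".toList ("github.com".toList ++ "/".toList)
        rw [h1, Bool.true_and, List.drop_left] at h
        exact h
      have hd : List.drop ("https://github.com/".toList.length) ("https://".toList ++ r)
          = List.drop (("github.com".toList ++ "/".toList).length) r := by
        rw [show ("https://github.com/".toList.length) = "https://".toList.length
          + ("github.com".toList ++ "/".toList).length from by decide, List.drop_append]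
        simp
      have hf2 : PySem.Chars.startswith ("https://".toList ++ r) "http://github.com/".toList = false :=
        sw_mono _ "http://".toList "github.com/".toList h2f
      by_cases hc : PySem.Chars.startswith r ("github.com".toList ++ "/".toList) = true
      · rw [if_pos (show PySem.Chars.startswith ("https://".toList ++ r)
            "https://github.com/".toList = true by rw [hf1, hc]), hc, Bool.true_and, hd]
      · rw [Bool.not_eq_true] at hc
        rw [if_neg (show ¬ PySem.Chars.startswith ("https://".toList ++ r)
            "https://github.com/".toList = true by rw [hf1, hc]; simp), hc, Bool.false_and, hf2]
        simp
    · rw [Bool.not_eq_true] at h1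
      have hf1 : PySem.Chars.startswith s "https://github.com/".toList = false :=
        sw_mono s "https://".toList "github.com/".toList h1
      rw [if_neg (show ¬ PySem.Chars.startswith s "https://github.com/".toList = true by rw [hf1]; simp)]
      by_cases h2 : PySem.Chars.startswith s "http://".toList = true
      · rw [if_pos (show (PySem.Chars.startswith s "https://".toList
            || PySem.Chars.startswith s "http://".toList) = true by rw [h2]; simp)]
        obtain ⟨r, hr⟩ := (PySem.Chars.startswith_iff s _).mp h2
        subst hr
        have hpart : pyPartition ("http://".toList ++ r) "://".toList = ("http".toList, "://".toList, r) :=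
          partition_at "http".toList "://".toList r (by decide)
        rw [hpart, check_eq _ _ _ (by decide) (by decide)]
        have hf2 : PySem.Chars.startswith ("http://".toList ++ r) "http://github.com/".toList
            = PySem.Chars.startswith r ("github.com".toList ++ "/".toList) := by
          have h := sw_append ("http://".toList ++ r) "http://".toList ("github.com".toList ++ "/".toList)
          rw [h2, Bool.true_and, List.drop_left] at h
          exact h
        have hd : List.drop ("http://github.com/".toList.length) ("http://".toList ++ r)
            = List.drop (("github.com".toList ++ "/".toList).length) r := by
          rw [show ("http://github.com/".toList.length) = "http://".toList.length
            + ("github.com".toList ++ "/".toList).length from by decide, List.drop_append]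
          simp
        by_cases hc : PySem.Chars.startswith r ("github.com".toList ++ "/".toList) = true
        · rw [if_pos (show PySem.Chars.startswith ("http://".toList ++ r)
              "http://github.com/".toList = true by rw [hf2, hc]), hc, Bool.true_and, hd]
        · rw [Bool.not_eq_true] at hc
          rw [if_neg (show ¬ PySem.Chars.startswith ("http://".toList ++ r)
              "http://github.com/".toList = true by rw [hf2, hc]; simp), hc, Bool.false_and]
      · rw [Bool.not_eq_true] at h2
        have hf2 : PySem.Chars.startswith s "http://github.com/".toList = false :=
          sw_mono s "http://".toList "github.com/".toList h2
        rw [if_neg (show ¬ PySem.Chars.startswith s "http://github.com/".toList = true by rw [hf2]; simp),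
          if_neg (show ¬ (PySem.Chars.startswith s "https://".toList
            || PySem.Chars.startswith s "http://".toList) = true by rw [h1, h2]; simp)]

theorem is_target_repo_py_eq (remote_url github_username : String) :
    is_target_repo_py remote_url github_username = is_target_repo_py_alt remote_url github_username :=
  core_eq (PySem.Chars.lower (PySem.Chars.strip remote_url.toList)) github_username

-- ===== VERDICT (by name: the statement is the Claim_ definition above) =====
theorem is_target_repo_py_spec : Claim_equal_is_target_repo_py := by
  intro remote_url github_username _
  exact is_target_repo_py_eq remote_url github_username
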